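-- pv_equiv track=rewrite | github.com/kms70847/parser | KBasic/main.py | tokenizeProgram
-- ===== SOURCE A (Python) =====
-- def tokenizeProgram(data):
--     lines = data.split("\n")
--     #remove comments
--     lines = [line.partition("#")[0] for line in lines]
--     characters = []
--     inString = False
--     for char in "".join(lines):
--         if char == "\"":
--             inString = not inString
--         if char == " " and not inString: continue
--         if char == "\t" and not inString: continue
--         characters.append(char)
--     return "".join(characters)
-- ===== SOURCE B (Python) =====
-- def tokenizeProgram(data):
--     # same comment stripping as before, then toggle-free string handling:
--     # split on '"' -- even-indexed segments are outside string literals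
--     # (each '"' flips the state), so only those get spaces/tabs removed.
--     text = "".join(line.partition("#")[0] for line in data.split("\n"))
--     parts = text.split('"')
--     cleaned = [seg if i % 2 == 1 else "".join(ch for ch in seg if ch not in " \t")
--                for i, seg in enumerate(parts)]
--     return '"'.join(cleaned)
-- ===== Notes on version B (the rewrite author's own statement) =====
-- stated objective: alternative
-- what changed: Replaces A's character-by-character loop with a running inString flag by splitting the comment-stripped text on the double-quote character and removing spaces/tabs only from even-indexed (outside-string) segments, rejoined with the same separator.
import Mathlib
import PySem

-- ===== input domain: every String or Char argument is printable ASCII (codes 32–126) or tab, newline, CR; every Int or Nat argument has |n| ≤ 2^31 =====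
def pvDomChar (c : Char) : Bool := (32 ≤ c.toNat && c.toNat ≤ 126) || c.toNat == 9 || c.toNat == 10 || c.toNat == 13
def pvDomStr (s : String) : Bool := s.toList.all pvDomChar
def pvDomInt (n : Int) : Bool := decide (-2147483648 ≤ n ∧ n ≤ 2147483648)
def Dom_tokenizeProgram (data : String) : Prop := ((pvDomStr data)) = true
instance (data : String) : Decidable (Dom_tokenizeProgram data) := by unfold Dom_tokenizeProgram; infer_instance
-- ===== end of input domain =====

-- B replaces A's running inString flag by splitting on '"' and cleaning only the
-- even-indexed (outside-string) segments; same return value, similar cost (objective: alternative).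

-- ===== PORT A =====
-- the 'for char in …' loop of A: state = inString; the appends to 'characters' become cons
def tokenizeLoop : List Char → Bool → List Char
  | [], _ => []
  | c :: rest, inString =>
    let inString' := if c == '"' then !inString else inString
    if c == ' ' && !inString' then tokenizeLoop rest inString'
    else if c == '\t' && !inString' then tokenizeLoop rest inString'
    else c :: tokenizeLoop rest inString'

def tokenizeProgram (data : String) : String :=
  let lines := PySem.Chars.splitOn data.toList ['\n']
  -- line.partition("#")[0] = the characters before the first '#': exact
  let lines := lines.map (fun line => line.takeWhile (fun c => c != '#'))
  String.mk (tokenizeLoop (PySem.Chars.join [] lines) false)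

-- ===== PORT B =====
def tokenizeProgram_alt (data : String) : String :=
  let text := PySem.Chars.join []
    ((PySem.Chars.splitOn data.toList ['\n']).map (fun line => line.takeWhile (fun c => c != '#')))
  let parts := PySem.Chars.splitOn text ['"']
  -- 'ch not in " \t"' on a character is exactly ch ≠ ' ' ∧ ch ≠ '\t'
  let cleaned := (PySem.List.enumerate parts).map (fun p =>
    if p.1 % 2 == 1 then p.2 else p.2.filter (fun ch => ch != ' ' && ch != '\t'))
  String.mk (PySem.Chars.join ['"'] cleaned)

-- ===== PRECONDITION & SPEC =====
def Spec_tokenizeProgram (data : String) (out : String) : Prop := out = tokenizeProgram_alt data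
instance (data : String) (out : String) : Decidable (Spec_tokenizeProgram data out) := by unfold Spec_tokenizeProgram; infer_instance

-- ===== CLAIM (what is proved, stated in full; the proofs are below) =====
def Claim_equal_tokenizeProgram : Prop := ∀ (data : String), Dom_tokenizeProgram data → Spec_tokenizeProgram data (tokenizeProgram data)

-- ===== LEMMAS AND PROOFS =====

-- simple recursive characterisation of splitting on the single character '"'
def split1 : List Char → List (List Char)
  | [] => [[]]
  | c :: rest =>
    if c = '"' then [] :: split1 rest
    else
      match split1 rest with
      | [] => [[c]]
      | p :: ps => (c :: p) :: ps

def strip1 (xs : List Char) : List Char := xs.filter (fun ch => ch != ' ' && ch != '\t')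

-- clean alternate segments, starting inside (true) or outside (false) a string
def proc : Bool → List (List Char) → List (List Char)
  | _, [] => []
  | inside, p :: ps => (if inside then p else strip1 p) :: proc (!inside) ps

-- join with '"'
def joinQ : List (List Char) → List Char
  | [] => []
  | [p] => p
  | p :: ps => p ++ '"' :: joinQ ps

lemma split1_ne_nil (cs : List Char) : split1 cs ≠ [] := by
  cases cs with
  | nil => simp [split1]
  | cons c rest =>
    simp only [split1]
    split
    · simp
    · cases h : split1 rest <;> simp

lemma proc_ne_nil (b : Bool) (ps : List (List Char)) (h : ps ≠ []) : proc b ps ≠ [] := by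
  cases ps with
  | nil => exact absurd rfl h
  | cons p ps => simp [proc]

lemma joinQ_cons (p : List Char) (ps : List (List Char)) (h : ps ≠ []) :
    joinQ (p :: ps) = p ++ '"' :: joinQ ps := by
  cases ps with
  | nil => exact absurd rfl h
  | cons q qs => rfl

lemma joinQ_append_head (x p : List Char) (ps : List (List Char)) :
    joinQ ((x ++ p) :: ps) = x ++ joinQ (p :: ps) := by
  cases ps with
  | nil => rfl
  | cons q qs => simp [joinQ]

lemma joinQ_eq_intercalate (ps : List (List Char)) :
    joinQ ps = List.intercalate ['"'] ps := by
  induction ps with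
  | nil => rfl
  | cons p qs ih =>
    cases qs with
    | nil => simp [joinQ, List.intercalate]
    | cons q qs' =>
      rw [joinQ_cons p _ (by simp), ih]
      simp [List.intercalate, List.intersperse]

lemma go_eq_split1 (l : List Char) : ∀ (fuel : Nat) (cur : List Char) (acc : List (List Char)),
    l.length < fuel →
    PySem.Chars.splitOn.go ['"'] fuel l cur acc =
      acc.reverse ++ (match split1 l with
        | [] => []
        | p :: ps => (cur.reverse ++ p) :: ps) := by
  induction l with
  | nil =>
    intro fuel cur acc hf
    cases fuel with
    | zero => omega
    | succ f => simp [PySem.Chars.splitOn.go, split1]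
  | cons c rest ih =>
    intro fuel cur acc hf
    cases fuel with
    | zero => omega
    | succ f =>
      by_cases hc : c = '"'
      · subst hc
        rw [show PySem.Chars.splitOn.go ['"'] (f+1) ('"' :: rest) cur acc
              = PySem.Chars.splitOn.go ['"'] f rest [] (cur.reverse :: acc) by
            simp [PySem.Chars.splitOn.go]]
        rw [ih f [] (cur.reverse :: acc) (by simpa using Nat.lt_of_succ_lt_succ hf)]
        simp only [split1]
        cases h : split1 rest with
        | nil => exact absurd h (split1_ne_nil rest)
        | cons p ps => simp
      · rw [show PySem.Chars.splitOn.go ['"'] (f+1) (c :: rest) cur acc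
              = PySem.Chars.splitOn.go ['"'] f rest (c :: cur) acc by
            simp [PySem.Chars.splitOn.go, List.isPrefixOf]
            intro h; exact absurd h.symm hc]
        rw [ih f (c :: cur) acc (by simpa using Nat.lt_of_succ_lt_succ hf)]
        simp only [split1, if_neg hc]
        cases h : split1 rest with
        | nil => exact absurd h (split1_ne_nil rest)
        | cons p ps => simp

lemma splitOn_quote_eq_split1 (cs : List Char) :
    PySem.Chars.splitOn cs ['"'] = split1 cs := by
  show PySem.Chars.splitOn.go ['"'] (cs.length + 1) cs [] [] = split1 cs
  rw [go_eq_split1 cs (cs.length + 1) [] [] (by omega)]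
  cases h : split1 cs with
  | nil => exact absurd h (split1_ne_nil cs)
  | cons p ps => simp

-- the enumerate-parity map of port B is exactly the alternating cleaner 'proc'
lemma enumerate_map_eq_proc (ps : List (List Char)) : ∀ (k : Int),
    (PySem.List.enumerate ps k).map (fun p =>
        if p.1 % 2 == 1 then p.2 else p.2.filter (fun ch => ch != ' ' && ch != '\t'))
      = proc (k % 2 == 1) ps := by
  induction ps with
  | nil => intro k; simp [PySem.List.enumerate, proc]
  | cons p ps ih =>
    intro k
    simp only [PySem.List.enumerate, List.map_cons, proc, ih (k + 1)]
    have hpar : ((k + 1) % 2 == 1) = !(k % 2 == 1) := by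
      rcases Int.emod_two_eq_zero_or_one k with h | h
      · have h1 : (k + 1) % 2 = 1 := by omega
        simp [h, h1]
      · have h0 : (k + 1) % 2 = 0 := by omega
        simp [h, h0]
    by_cases hk : k % 2 = 1
    · simp [hk, hpar]
    · have hk0 : k % 2 = 0 := by rcases Int.emod_two_eq_zero_or_one k with h | h <;> omega
      simp [hk0, hpar, strip1]

-- A's loop computes exactly: clean the outside segments, keep the quotes
lemma tokenizeLoop_eq (cs : List Char) : ∀ (b : Bool),
    tokenizeLoop cs b = joinQ (proc b (split1 cs)) := by
  induction cs with
  | nil => intro b; simp [tokenizeLoop, split1, proc, strip1, joinQ]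
  | cons c rest ih =>
    intro b
    by_cases hc : c = '"'
    · subst hc
      have h1 : tokenizeLoop ('"' :: rest) b = '"' :: tokenizeLoop rest (!b) := by
        simp [tokenizeLoop]
      rw [h1, ih (!b), show split1 ('"' :: rest) = [] :: split1 rest by simp [split1]]
      cases hs : split1 rest with
      | nil => exact absurd hs (split1_ne_nil rest)
      | cons p ps =>
        rw [show proc b ([] :: p :: ps) = (if b then [] else strip1 []) :: proc (!b) (p :: ps) from rfl]
        rw [joinQ_cons _ _ (proc_ne_nil _ _ (by simp))]
        simp [strip1]
    · rw [show split1 (c :: rest) = (match split1 rest with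
            | [] => [[c]] | p :: ps => (c :: p) :: ps) by simp [split1, hc]]
      cases hs : split1 rest with
      | nil => exact absurd hs (split1_ne_nil rest)
      | cons p ps =>
        have hrest := ih b
        rw [hs] at hrest
        rw [show proc b ((c :: p) :: ps) = (if b then c :: p else strip1 (c :: p)) :: proc (!b) ps from rfl]
        rw [show proc b (p :: ps) = (if b then p else strip1 p) :: proc (!b) ps from rfl] at hrest
        cases b with
        | true =>
          have : tokenizeLoop (c :: rest) true = c :: tokenizeLoop rest true := by
            simp [tokenizeLoop, hc]
          rw [this, hrest]
          symm
          simpa using joinQ_append_head [c] p (proc false ps)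
        | false =>
          by_cases hsp : c = ' ' ∨ c = '\t'
          · have hl : tokenizeLoop (c :: rest) false = tokenizeLoop rest false := by
              rcases hsp with h | h <;> subst h <;> simp [tokenizeLoop]
            have hstrip : strip1 (c :: p) = strip1 p := by
              rcases hsp with h | h <;> subst h <;> simp [strip1]
            rw [hl, hrest]; simp [hstrip]
          · rw [not_or] at hsp
            have hl : tokenizeLoop (c :: rest) false = c :: tokenizeLoop rest false := by
              simp [tokenizeLoop, hc, hsp.1, hsp.2]
            have hstrip : strip1 (c :: p) = c :: strip1 p := by
              simp [strip1, hsp.1, hsp.2]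
            rw [hl, hrest]; simp only [Bool.false_eq_true, hstrip, Bool.not_false]
            symm
            simpa using joinQ_append_head [c] (strip1 p) (proc true ps)

-- ===== VERDICT (by name: the statement is the Claim_ definition above) =====
theorem tokenizeProgram_spec : Claim_equal_tokenizeProgram := by
  intro data _
  show tokenizeProgram data = tokenizeProgram_alt data
  unfold tokenizeProgram tokenizeProgram_alt
  simp only [splitOn_quote_eq_split1, enumerate_map_eq_proc, PySem.Chars.join]
  rw [show ((0 : Int) % 2 == 1) = false from rfl]
  rw [tokenizeLoop_eq _ false, joinQ_eq_intercalate]
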